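-- pv_equiv track=rewrite | github.com/ashler-herrick/py-theta-client | scripts/find_missing.py | format_detailed_report
-- ===== SOURCE A (Python) =====
-- def format_detailed_report(missing_data):
--     """Generate detailed table of all missing entries."""
--     lines = []
--     lines.append("=" * 70)
--     lines.append("DETAILED MISSING DATA REPORT")
--     lines.append("=" * 70)
--     lines.append("")
--     lines.append(f"{'Ticker':<10} {'Year':<8} {'Month':<8} {'Missing Days':<15}")
--     lines.append("-" * 50)
--
--     # Collect all entries
--     entries = []
--     for ticker in missing_data:
--         for year in missing_data[ticker]:
--             for month in missing_data[ticker][year]: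
--                 count = missing_data[ticker][year][month]
--                 entries.append((ticker, year, month, count))
--
--     # Sort by ticker, then year, then month
--     entries.sort()
--
--     total_days = 0
--     for ticker, year, month, count in entries:
--         lines.append(f"{ticker:<10} {year:<8} {month:02d}       {count:<15}")
--         total_days += count
--
--     lines.append("")
--     lines.append(f"Total entries: {len(entries)}")
--     lines.append(f"Total missing days: {total_days}")
--
--     return "\n".join(lines)
-- ===== SOURCE B (Python) =====
-- def format_detailed_report(missing_data):
--     """Generate detailed table of all missing entries."""
--     header = []
--     header.append("=" * 70)
--     header.append("DETAILED MISSING DATA REPORT")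
--     header.append("=" * 70)
--     header.append("")
--     header.append(f"{'Ticker':<10} {'Year':<8} {'Month':<8} {'Missing Days':<15}")
--     header.append("-" * 50)
--     body = []
--     entry_count = 0
--     total_days = 0
--     # per-level sorted traversal; keys are unique per level, so this matches a global tuple sort
--     for ticker in sorted(missing_data):
--         for year in sorted(missing_data[ticker]):
--             for month in sorted(missing_data[ticker][year]):
--                 count = missing_data[ticker][year][month]
--                 body.append(f"{ticker:<10} {year:<8} {month:02d}       {count:<15}")
--                 entry_count += 1
--                 total_days += count
--     footer = ["", f"Total entries: {entry_count}", f"Total missing days: {total_days}"]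
--     return "\n".join(header + body + footer)
-- ===== Notes on version B (the rewrite author's own statement) =====
-- stated objective: alternative
-- what changed: Replaces A's flat entries list plus global 4-tuple sort with a nested per-level sorted traversal (sorted tickers, then sorted years, then sorted months) that formats each line immediately and maintains running entry/day counters; Pre_ only excludes association lists with duplicate keys at some level, which represent no Python dict.
import Mathlib
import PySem

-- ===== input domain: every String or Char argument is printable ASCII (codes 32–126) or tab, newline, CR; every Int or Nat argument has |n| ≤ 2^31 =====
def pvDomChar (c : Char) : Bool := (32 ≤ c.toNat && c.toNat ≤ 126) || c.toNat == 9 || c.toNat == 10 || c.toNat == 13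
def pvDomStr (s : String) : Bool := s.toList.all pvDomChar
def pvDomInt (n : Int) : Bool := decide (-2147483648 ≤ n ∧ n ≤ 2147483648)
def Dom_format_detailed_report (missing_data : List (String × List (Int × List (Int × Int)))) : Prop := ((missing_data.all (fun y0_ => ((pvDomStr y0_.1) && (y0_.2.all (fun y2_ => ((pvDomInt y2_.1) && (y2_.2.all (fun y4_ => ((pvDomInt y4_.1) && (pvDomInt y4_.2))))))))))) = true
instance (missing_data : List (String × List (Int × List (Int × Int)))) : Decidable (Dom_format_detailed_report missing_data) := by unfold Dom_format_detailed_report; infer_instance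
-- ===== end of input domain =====

-- B replaces A's flat entries list + global tuple sort by a nested per-level sorted traversal with
-- running counters (different decomposition, same output; no speed claim).

-- shared helpers: both Pythons contain the very same f-strings and header/footer literals
-- s.ljust-style padding as done by f"{x:<w}" (exact for ASCII strings: pad with spaces on the right)
def pyLjust (s : String) (w : Nat) : String := String.ofList (s.toList ++ List.replicate (w - s.toList.length) ' ')
-- f"{ticker:<10} {year:<8} {month:02d}       {count:<15}"  (":02d" on an int = str + zfill 2, exact incl. negatives)
def fmtEntry (ticker : String) (year month count : Int) : String :=
  pyLjust ticker 10 ++ " " ++ pyLjust (PySem.Int.toStr year) 8 ++ " " ++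
  PySem.Str.zfill (PySem.Int.toStr month) 2 ++ "       " ++ pyLjust (PySem.Int.toStr count) 15
-- the six header lines both Pythons append before the table
def pvHeader : List String :=
  [String.ofList (List.replicate 70 '='), "DETAILED MISSING DATA REPORT", String.ofList (List.replicate 70 '='), "",
   pyLjust "Ticker" 10 ++ " " ++ pyLjust "Year" 8 ++ " " ++ pyLjust "Month" 8 ++ " " ++ pyLjust "Missing Days" 15,
   String.ofList (List.replicate 50 '-')]
-- Python's global entries.sort() compares 4-tuples lexicographically
def entryKey (e : String × Int × Int × Int) : String ×ₗ (Int ×ₗ (Int ×ₗ Int)) :=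
  toLex (e.1, toLex (e.2.1, toLex (e.2.2.1, e.2.2.2)))

-- ===== PORT A =====
-- `for ticker in missing_data: … missing_data[ticker] …` walks the dict's (key,value) pairs in order;
-- ported as a fold over the association list's pairs, exact for the duplicate-free lists Pre_ admits
def format_detailed_report (missing_data : List (String × List (Int × List (Int × Int)))) : String :=
  let lines : List String := pvHeader
  let entries : List (String × Int × Int × Int) :=
    missing_data.foldl (fun acc tp =>
      tp.2.foldl (fun acc yp =>
        yp.2.foldl (fun acc mp => acc ++ [(tp.1, yp.1, mp.1, mp.2)]) acc) acc) []
  let entries := PySem.List.sorted entries entryKey false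
  let r := entries.foldl
    (fun (p : List String × Int) e => (p.1 ++ [fmtEntry e.1 e.2.1 e.2.2.1 e.2.2.2], p.2 + e.2.2.2))
    (lines, 0)
  let lines := r.1 ++ ["", "Total entries: " ++ PySem.Int.toStr (entries.length : Int),
                       "Total missing days: " ++ PySem.Int.toStr r.2]
  PySem.Str.join "\n" lines

-- ===== PORT B =====
-- `for ticker in sorted(missing_data): … missing_data[ticker] …` = walk the pairs sorted by key
-- (exact for the duplicate-free lists Pre_ admits); state = (body, entry_count, total_days)
def format_detailed_report_alt (missing_data : List (String × List (Int × List (Int × Int)))) : String :=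
  let st := (PySem.List.sorted missing_data (fun tp => tp.1) false).foldl (fun st tp =>
      (PySem.List.sorted tp.2 (fun yp => yp.1) false).foldl (fun st yp =>
        (PySem.List.sorted yp.2 (fun mp => mp.1) false).foldl (fun st mp =>
          (st.1 ++ [fmtEntry tp.1 yp.1 mp.1 mp.2], st.2.1 + 1, st.2.2 + mp.2)) st) st)
    (([] : List String), (0 : Int), (0 : Int))
  PySem.Str.join "\n" (pvHeader ++ st.1 ++
    ["", "Total entries: " ++ PySem.Int.toStr st.2.1, "Total missing days: " ++ PySem.Int.toStr st.2.2])

-- ===== PRECONDITION & SPEC =====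
-- Pre_ excludes association lists with a duplicate key at some level: those represent no Python dict
-- (A's argument is a dict), so A never returns on them.
def Pre_format_detailed_report (missing_data : List (String × List (Int × List (Int × Int)))) : Prop :=
  (missing_data.map Prod.fst).Nodup ∧
  ∀ p ∈ missing_data, (p.2.map Prod.fst).Nodup ∧ ∀ q ∈ p.2, (q.2.map Prod.fst).Nodup
instance (missing_data : List (String × List (Int × List (Int × Int)))) : Decidable (Pre_format_detailed_report missing_data) := by unfold Pre_format_detailed_report; infer_instance
def pvWitness_format_detailed_report : (List (String × List (Int × List (Int × Int)))) :=
  [("MSFT", [(2023, [(7, 1)])]), ("AAPL", [(2024, [(1, 3), (2, 5)]), (2023, [(12, 2)])])]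

def Spec_format_detailed_report (missing_data : List (String × List (Int × List (Int × Int)))) (out : String) : Prop := out = format_detailed_report_alt missing_data
instance (missing_data : List (String × List (Int × List (Int × Int)))) (out : String) : Decidable (Spec_format_detailed_report missing_data out) := by unfold Spec_format_detailed_report; infer_instance

-- ===== CLAIM (what is proved, stated in full; the proofs are below) =====
def Claim_equal_format_detailed_report : Prop := ∀ (missing_data : List (String × List (Int × List (Int × Int)))), Dom_format_detailed_report missing_data → Pre_format_detailed_report missing_data → Spec_format_detailed_report missing_data (format_detailed_report missing_data)

-- ===== LEMMAS AND PROOFS =====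

-- abbreviations for the proof
def fmtE (e : String × Int × Int × Int) : String := fmtEntry e.1 e.2.1 e.2.2.1 e.2.2.2
def cntE (e : String × Int × Int × Int) : Int := e.2.2.2
def monthEntries (tk : String) (yr : Int) (md : List (Int × Int)) : List (String × Int × Int × Int) :=
  md.map (fun mp => (tk, yr, mp.1, mp.2))
def allEntries (d : List (String × List (Int × List (Int × Int)))) : List (String × Int × Int × Int) :=
  d.flatMap (fun tp => tp.2.flatMap (fun yp => monthEntries tp.1 yp.1 yp.2))
def bEntries (d : List (String × List (Int × List (Int × Int)))) : List (String × Int × Int × Int) :=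
  (PySem.List.sorted d (fun tp => tp.1) false).flatMap (fun tp =>
    (PySem.List.sorted tp.2 (fun yp => yp.1) false).flatMap (fun yp =>
      monthEntries tp.1 yp.1 (PySem.List.sorted yp.2 (fun mp => mp.1) false)))

-- A's entries-building nested fold is allEntries
lemma entriesA_month (tk : String) (yr : Int) (md : List (Int × Int))
    (acc : List (String × Int × Int × Int)) :
    md.foldl (fun acc mp => acc ++ [(tk, yr, mp.1, mp.2)]) acc = acc ++ monthEntries tk yr md := by
  induction md generalizing acc with
  | nil => simp [monthEntries]
  | cons m t ih => simp [monthEntries, ih]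

lemma entriesA_year (tk : String) (yd : List (Int × List (Int × Int)))
    (acc : List (String × Int × Int × Int)) :
    yd.foldl (fun acc yp => yp.2.foldl (fun acc mp => acc ++ [(tk, yp.1, mp.1, mp.2)]) acc) acc
      = acc ++ yd.flatMap (fun yp => monthEntries tk yp.1 yp.2) := by
  induction yd generalizing acc with
  | nil => simp
  | cons y t ih =>
    rw [List.foldl_cons, entriesA_month, ih, List.flatMap_cons, List.append_assoc]

lemma entriesA_eq (d : List (String × List (Int × List (Int × Int)))) :
    d.foldl (fun acc tp =>
      tp.2.foldl (fun acc yp =>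
        yp.2.foldl (fun acc mp => acc ++ [(tp.1, yp.1, mp.1, mp.2)]) acc) acc) []
      = allEntries d := by
  suffices h : ∀ acc, d.foldl (fun acc tp =>
      tp.2.foldl (fun acc yp =>
        yp.2.foldl (fun acc mp => acc ++ [(tp.1, yp.1, mp.1, mp.2)]) acc) acc) acc
      = acc ++ allEntries d by simpa using h []
  induction d with
  | nil => simp [allEntries]
  | cons p t ih =>
    intro acc
    rw [List.foldl_cons, entriesA_year, ih]
    simp [allEntries]

-- closed form of A's report-building fold (pair state)
lemma foldA_closed (es : List (String × Int × Int × Int)) (ls : List String) (t : Int) :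
    es.foldl (fun (p : List String × Int) e =>
        (p.1 ++ [fmtEntry e.1 e.2.1 e.2.2.1 e.2.2.2], p.2 + e.2.2.2)) (ls, t)
      = (ls ++ es.map fmtE, t + (es.map cntE).sum) := by
  induction es generalizing ls t with
  | nil => simp
  | cons e es ih => simp [ih, fmtE, cntE]; ring

-- closed form of B's generic fold (triple state)
def genStep (st : List String × Int × Int) (e : String × Int × Int × Int) : List String × Int × Int :=
  (st.1 ++ [fmtE e], st.2.1 + 1, st.2.2 + cntE e)

lemma foldB_closed (es : List (String × Int × Int × Int)) (ls : List String) (n t : Int) :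
    es.foldl genStep (ls, n, t) = (ls ++ es.map fmtE, n + es.length, t + (es.map cntE).sum) := by
  induction es generalizing ls n t with
  | nil => simp
  | cons e es ih => simp [genStep, ih, add_assoc, add_comm, add_left_comm]

lemma foldl_genStep_flatMap {α : Type} (l : List α) (g : α → List (String × Int × Int × Int))
    (st : List String × Int × Int) :
    l.foldl (fun st x => (g x).foldl genStep st) st = (l.flatMap g).foldl genStep st := by
  induction l generalizing st with
  | nil => simp
  | cons x t ih => simp [ih, List.foldl_append]

-- B's nested fold runs genStep over bEntries
lemma foldB_eq (d : List (String × List (Int × List (Int × Int)))) :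
    (PySem.List.sorted d (fun tp => tp.1) false).foldl (fun st tp =>
      (PySem.List.sorted tp.2 (fun yp => yp.1) false).foldl (fun st yp =>
        (PySem.List.sorted yp.2 (fun mp => mp.1) false).foldl (fun st mp =>
          (st.1 ++ [fmtEntry tp.1 yp.1 mp.1 mp.2], st.2.1 + 1, st.2.2 + mp.2)) st) st)
      (([] : List String), (0 : Int), (0 : Int))
      = ((bEntries d).map fmtE, ((bEntries d).length : Int), ((bEntries d).map cntE).sum) := by
  have hmon : ∀ (tk : String) (yr : Int) (md : List (Int × Int)) (st : List String × Int × Int),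
      md.foldl (fun st mp => (st.1 ++ [fmtEntry tk yr mp.1 mp.2], st.2.1 + 1, st.2.2 + mp.2)) st
        = (monthEntries tk yr md).foldl genStep st := by
    intro tk yr md st
    simp [monthEntries, List.foldl_map, genStep, fmtE, cntE]
  have hyear : ∀ (tk : String) (yd : List (Int × List (Int × Int))) (st : List String × Int × Int),
      yd.foldl (fun st yp =>
        (PySem.List.sorted yp.2 (fun mp => mp.1) false).foldl (fun st mp =>
          (st.1 ++ [fmtEntry tk yp.1 mp.1 mp.2], st.2.1 + 1, st.2.2 + mp.2)) st) st
        = (yd.flatMap (fun yp => monthEntries tk yp.1 (PySem.List.sorted yp.2 (fun mp => mp.1) false))).foldl genStep st := by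
    intro tk yd st
    rw [← foldl_genStep_flatMap]
    exact List.foldl_ext _ _ _ (fun st yp _ => hmon tk yp.1 _ st)
  calc _ = (bEntries d).foldl genStep (([] : List String), (0 : Int), (0 : Int)) := by
            rw [bEntries, ← foldl_genStep_flatMap]
            exact List.foldl_ext _ _ _ (fun st tp _ => hyear tp.1 _ st)
       _ = _ := by simp [foldB_closed]

-- strict key increase across and inside chunks
lemma entryKey_lt {x y : String × Int × Int × Int}
    (h : x.1 < y.1 ∨ (x.1 = y.1 ∧ (x.2.1 < y.2.1 ∨ (x.2.1 = y.2.1 ∧ x.2.2.1 < y.2.2.1)))) :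
    entryKey x < entryKey y := by
  unfold entryKey
  rcases h with h | ⟨h1, h | ⟨h2, h3⟩⟩
  · simp [Prod.Lex.toLex_lt_toLex, h]
  · simp [Prod.Lex.toLex_lt_toLex, h1, h]
  · simp [Prod.Lex.toLex_lt_toLex, h1, h2, h3]

lemma mem_monthEntries {tk : String} {yr : Int} {md : List (Int × Int)}
    {x : String × Int × Int × Int} (hx : x ∈ monthEntries tk yr md) :
    x.1 = tk ∧ x.2.1 = yr ∧ (x.2.2.1, x.2.2.2) ∈ md := by
  simp only [monthEntries, List.mem_map] at hx
  obtain ⟨mp, hmp, rfl⟩ := hx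
  exact ⟨rfl, rfl, hmp⟩

-- Pairwise over a flatMap, from inner pairwise and cross-chunk relation
lemma pairwise_flatMap' {α β : Type} {R : β → β → Prop} {l : List α} {g : α → List β}
    (h1 : ∀ a ∈ l, (g a).Pairwise R)
    (h2 : l.Pairwise (fun a b => ∀ x ∈ g a, ∀ y ∈ g b, R x y)) :
    (l.flatMap g).Pairwise R := by
  induction l with
  | nil => simp
  | cons a t ih =>
    rw [List.pairwise_cons] at h2
    rw [List.flatMap_cons, List.pairwise_append]
    refine ⟨h1 a (by simp), ih (fun b hb => h1 b (by simp [hb])) h2.2, ?_⟩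
    intro x hx y hy
    simp only [List.mem_flatMap] at hy
    obtain ⟨b, hb, hyb⟩ := hy
    exact h2.1 b hb x hx y hyb

-- a duplicate-free sorted list is strictly increasing in its key
lemma sorted_strict {α κ : Type} [LinearOrder κ] (xs : List α) (key : α → κ)
    (hnd : (xs.map key).Nodup) :
    (PySem.List.sorted xs key false).Pairwise (fun a b => key a < key b) := by
  have hle := PySem.List.sorted_pairwise xs key
  have hperm : ((PySem.List.sorted xs key false).map key).Perm (xs.map key) :=
    (PySem.List.sorted_perm xs key false).map key
  have hnd' : ((PySem.List.sorted xs key false).map key).Nodup := hperm.nodup_iff.mpr hnd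
  rw [List.Nodup, List.pairwise_map] at hnd'
  refine (hle.and hnd').imp ?_
  intro a b hab
  exact lt_of_le_of_ne hab.1 hab.2

-- the heart: A's globally sorted entry list equals B's nested-sorted traversal order
lemma sorted_entries_eq (d : List (String × List (Int × List (Int × Int))))
    (hpre : Pre_format_detailed_report d) :
    PySem.List.sorted (allEntries d) entryKey false = bEntries d := by
  apply PySem.List.sorted_eq_of_perm_of_pairwise_lt
  · -- bEntries d is a permutation of allEntries d
    unfold bEntries allEntries
    refine ((PySem.List.sorted_perm d _ false).flatMap_right _).trans (List.Perm.flatMap_left _ ?_)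
    intro tp _
    refine ((PySem.List.sorted_perm tp.2 _ false).flatMap_right _).trans (List.Perm.flatMap_left _ ?_)
    intro yp _
    exact (PySem.List.sorted_perm yp.2 _ false).map _
  · -- bEntries d is strictly increasing in entryKey
    obtain ⟨hnd0, hnd12⟩ := hpre
    unfold bEntries
    apply pairwise_flatMap'
    · intro tp htp
      have htp' : tp ∈ d := (PySem.List.mem_sorted d _ false tp).mp htp
      apply pairwise_flatMap'
      · intro yp hyp
        have hyp' : yp ∈ tp.2 := (PySem.List.mem_sorted tp.2 _ false yp).mp hyp
        have hmd := sorted_strict yp.2 (fun mp => mp.1) (by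
          simpa using (hnd12 tp htp').2 yp hyp')
        rw [monthEntries, List.pairwise_map]
        refine hmd.imp ?_
        intro a b hab
        exact entryKey_lt (Or.inr ⟨rfl, Or.inr ⟨rfl, hab⟩⟩)
      · have hyd := sorted_strict tp.2 (fun yp => yp.1) (by
          simpa using (hnd12 tp htp').1)
        refine hyd.imp ?_
        intro a b hab x hx y hy
        obtain ⟨hx1, hx2, -⟩ := mem_monthEntries hx
        obtain ⟨hy1, hy2, -⟩ := mem_monthEntries hy
        exact entryKey_lt (Or.inr ⟨hx1.trans hy1.symm, Or.inl (by rw [hx2, hy2]; exact hab)⟩)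
    · have htd := sorted_strict d (fun tp => tp.1) (by simpa using hnd0)
      refine htd.imp ?_
      intro a b hab x hx y hy
      simp only [List.mem_flatMap] at hx hy
      obtain ⟨ya, -, hx⟩ := hx
      obtain ⟨yb, -, hy⟩ := hy
      obtain ⟨hx1, -, -⟩ := mem_monthEntries hx
      obtain ⟨hy1, -, -⟩ := mem_monthEntries hy
      exact entryKey_lt (Or.inl (by rw [hx1, hy1]; exact hab))

-- ===== VERDICT (by name: the statement is the Claim_ definition above) =====
theorem format_detailed_report_spec : Claim_equal_format_detailed_report := by
  intro d _ hpre
  unfold Spec_format_detailed_report format_detailed_report format_detailed_report_alt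
  simp only [entriesA_eq, foldB_eq d, sorted_entries_eq d hpre, foldA_closed]
  simp
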